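-- pv_equiv track=rewrite | github.com/hoangmdoan/Working-with-Python-Lists-Medical-Insurance-Costs | Bagscoin.py | tally_coins
-- ===== SOURCE A (Python) =====
-- QUARTER_DIAMETER = 24
--
-- DIME_DIAMETER = 18
--
-- NICKEL_DIAMETER = 21
--
-- PENNY_DIAMETER = 19
--
-- def tally_coins(bag_of_coins):
--     """Sorts and counts coins by denomination."""
--     counts = [0, 0, 0, 0, 0]  # quarter, dime, nickel, penny, foreign
--     for coin in bag_of_coins:
--         if coin == QUARTER_DIAMETER:
--             counts[0] += 1
--         elif coin == DIME_DIAMETER: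
--             counts[1] += 1
--         elif coin == NICKEL_DIAMETER:
--             counts[2] += 1
--         elif coin == PENNY_DIAMETER:
--             counts[3] += 1
--         else:
--             counts[4] += 1
--     return counts
-- ===== SOURCE B (Python) =====
-- QUARTER_DIAMETER = 24
-- DIME_DIAMETER = 18
-- NICKEL_DIAMETER = 21
-- PENNY_DIAMETER = 19
--
-- def tally_coins(bag_of_coins):
--     """Sorts and counts coins by denomination."""
--     freq = {}
--     total = 0
--     for coin in bag_of_coins:
--         freq[coin] = freq.get(coin, 0) + 1
--         total += 1
--     q = freq.get(QUARTER_DIAMETER, 0)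
--     d = freq.get(DIME_DIAMETER, 0)
--     n = freq.get(NICKEL_DIAMETER, 0)
--     p = freq.get(PENNY_DIAMETER, 0)
--     return [q, d, n, p, total - q - d - n - p]
-- ===== Notes on version B (the rewrite author's own statement) =====
-- stated objective: idiomatic
-- what changed: B builds a single frequency table of the bag in one pass and assembles the result by four lookups, deriving the foreign count by subtraction from the total, instead of A's per-element if/elif cascade mutating a 5-slot list.
import Mathlib
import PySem

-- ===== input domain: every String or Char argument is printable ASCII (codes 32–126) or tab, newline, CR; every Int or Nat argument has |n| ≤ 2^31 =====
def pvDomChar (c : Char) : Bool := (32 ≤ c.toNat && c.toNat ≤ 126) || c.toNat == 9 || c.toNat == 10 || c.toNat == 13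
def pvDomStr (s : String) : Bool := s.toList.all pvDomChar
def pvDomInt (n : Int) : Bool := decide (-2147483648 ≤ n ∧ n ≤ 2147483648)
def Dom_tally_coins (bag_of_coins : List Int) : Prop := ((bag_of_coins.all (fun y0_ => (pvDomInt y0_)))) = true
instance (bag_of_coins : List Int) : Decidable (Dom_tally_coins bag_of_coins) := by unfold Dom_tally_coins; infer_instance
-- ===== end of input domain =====

-- B: one-pass frequency table + lookups instead of A's per-element if/elif cascade (idiomatic; return value only).
-- ===== PORT A =====
def tallyStepA (c : Int × Int × Int × Int × Int) (coin : Int) : Int × Int × Int × Int × Int :=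
  if coin == 24 then (c.1 + 1, c.2.1, c.2.2.1, c.2.2.2.1, c.2.2.2.2)
  else if coin == 18 then (c.1, c.2.1 + 1, c.2.2.1, c.2.2.2.1, c.2.2.2.2)
  else if coin == 21 then (c.1, c.2.1, c.2.2.1 + 1, c.2.2.2.1, c.2.2.2.2)
  else if coin == 19 then (c.1, c.2.1, c.2.2.1, c.2.2.2.1 + 1, c.2.2.2.2)
  else (c.1, c.2.1, c.2.2.1, c.2.2.2.1, c.2.2.2.2 + 1)

def tally_coins (bag_of_coins : List Int) : List Int :=
  let c := bag_of_coins.foldl tallyStepA (0, 0, 0, 0, 0)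
  [c.1, c.2.1, c.2.2.1, c.2.2.2.1, c.2.2.2.2]

-- ===== PORT B =====
def tally_coins_alt (bag_of_coins : List Int) : List Int :=
  let st := bag_of_coins.foldl
    (fun (st : PySem.Dict Int Int × Int) coin =>
      (st.1.insert coin (st.1.getD coin 0 + 1), st.2 + 1))
    (PySem.Dict.empty, 0)
  let q := st.1.getD 24 0
  let d := st.1.getD 18 0
  let n := st.1.getD 21 0
  let p := st.1.getD 19 0
  [q, d, n, p, st.2 - q - d - n - p]

-- ===== PRECONDITION & SPEC =====
def Spec_tally_coins (bag_of_coins : List Int) (out : List Int) : Prop := out = tally_coins_alt bag_of_coins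
instance (bag_of_coins : List Int) (out : List Int) : Decidable (Spec_tally_coins bag_of_coins out) := by unfold Spec_tally_coins; infer_instance

-- ===== CLAIM (what is proved, stated in full; the proofs are below) =====
def Claim_equal_tally_coins : Prop := ∀ (bag_of_coins : List Int), Dom_tally_coins bag_of_coins → Spec_tally_coins bag_of_coins (tally_coins bag_of_coins)

-- ===== LEMMAS AND PROOFS =====

theorem foldA_char (l : List Int) (acc : Int × Int × Int × Int × Int) :
    l.foldl tallyStepA acc =
      (acc.1 + l.count 24, acc.2.1 + l.count 18, acc.2.2.1 + l.count 21,
       acc.2.2.2.1 + l.count 19,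
       acc.2.2.2.2 + l.length - l.count 24 - l.count 18 - l.count 21 - l.count 19) := by
  induction l generalizing acc with
  | nil => simp
  | cons x xs ih =>
    simp only [List.foldl_cons, ih, tallyStepA, List.count_cons, List.length_cons]
    by_cases h24 : x = 24
    · subst h24; simp [Prod.ext_iff]; omega
    · by_cases h18 : x = 18
      · subst h18; simp [Prod.ext_iff]; omega
      · by_cases h21 : x = 21
        · subst h21; simp [Prod.ext_iff]; omega
        · by_cases h19 : x = 19
          · subst h19; simp [Prod.ext_iff]; omega
          · simp [Prod.ext_iff, h24, h18, h21, h19]; omega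

theorem foldB_char (l : List Int) (d : PySem.Dict Int Int) (n : Int) :
    l.foldl (fun (st : PySem.Dict Int Int × Int) coin =>
        (st.1.insert coin (st.1.getD coin 0 + 1), st.2 + 1)) (d, n) =
      (l.foldl (fun d x => d.insert x (d.getD x 0 + 1)) d, n + l.length) := by
  induction l generalizing d n with
  | nil => simp
  | cons x xs ih => simp [List.foldl_cons, ih]; ring

-- ===== VERDICT (by name: the statement is the Claim_ definition above) =====
theorem tally_coins_spec : Claim_equal_tally_coins := by
  intro l _
  unfold Spec_tally_coins tally_coins tally_coins_alt
  simp only [foldA_char, foldB_char, PySem.Dict.getD_foldl_insert_add_one]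
  simp [PySem.Dict.getD, PySem.Dict.empty, PySem.Dict.get?]
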